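-- pv_equiv track=rewrite | github.com/pypi-data/pypi-mirror-151 | packages/atoml-utility/atoml-utility-2.3.4.1.tar.gz/atoml-utility-2.3.4.1/general_utility/utils.py | get_funname_from_protocol_version
-- ===== SOURCE A (Python) =====
-- def params_split(params, flag = ':'):
--     params = params.split(flag)
--     for i in range(len(params)):
--         params[i] = params[i].strip()
--     return params
--
-- def get_funname_from_protocol_version(protocol_version, prefix = ""):
--     ver_list = params_split(protocol_version, '.')
--     fun_name = prefix
--     fun_name_x = prefix
--
--     i = 0
--     for ver in ver_list:
--         if i >= 3: # 版本最长4位，最后一位为通配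
--             fun_name_x = fun_name_x + '_' + 'x'
--         else:
--             fun_name_x = fun_name_x + '_' + ver
--
--         fun_name = fun_name + '_' + ver
--         i = i + 1
--     return fun_name, fun_name_x
-- ===== SOURCE B (Python) =====
-- def get_funname_from_protocol_version(protocol_version, prefix=""):
--     # Recursive back-to-front construction: build the two "_"-joined suffixes
--     # by structural recursion on the split pieces, stripping as the recursion
--     # descends; the wildcard is decided by the recursion depth k, and the
--     # prefix is prepended once at the end (no accumulators, no counter loop).
--     def go(parts, k):
--         if not parts:
--             return "", ""
--         head = parts[0].strip()
--         rest, rest_x = go(parts[1:], k + 1)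
--         return "_" + head + rest, "_" + ("x" if k >= 3 else head) + rest_x
--     suffix, suffix_x = go(protocol_version.split('.'), 0)
--     return prefix + suffix, prefix + suffix_x
-- ===== Notes on version B (the rewrite author's own statement) =====
-- stated objective: alternative
-- what changed: Replaces the counter-driven accumulator loop by a structural recursion that builds both underscore-joined suffixes back-to-front (the wildcard decided by recursion depth), prepending the prefix once at the end.
import Mathlib
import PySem

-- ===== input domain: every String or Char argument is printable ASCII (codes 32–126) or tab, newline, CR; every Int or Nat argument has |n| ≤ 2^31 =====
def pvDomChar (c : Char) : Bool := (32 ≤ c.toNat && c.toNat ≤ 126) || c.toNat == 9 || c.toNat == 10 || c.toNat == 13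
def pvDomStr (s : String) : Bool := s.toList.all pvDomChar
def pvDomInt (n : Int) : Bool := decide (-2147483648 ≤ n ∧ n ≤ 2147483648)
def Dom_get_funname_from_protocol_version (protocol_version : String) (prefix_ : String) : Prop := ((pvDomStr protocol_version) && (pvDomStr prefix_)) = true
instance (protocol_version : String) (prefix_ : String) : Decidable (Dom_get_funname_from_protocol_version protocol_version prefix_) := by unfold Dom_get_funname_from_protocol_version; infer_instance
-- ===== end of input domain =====

-- B replaces A's counter/branch accumulation loop by a structural recursion building
-- both suffixes back-to-front (alternative decomposition, same cost).

-- ===== PORT A =====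
-- helper params_split: split then strip each piece; exact for flag ≠ "" (the only flag A passes is ".")
def params_split (params : String) (flag : String) : List String :=
  (PySem.Chars.splitOn params.toList flag.toList).map
    (fun p => PySem.Str.strip (String.ofList p))

def get_funname_from_protocol_version (protocol_version : String) (prefix_ : String) : String × String :=
  let ver_list := params_split protocol_version "."
  let st := ver_list.foldl
    (fun (st : String × String × Int) ver =>
      let fun_name_x := if st.2.2 ≥ 3 then st.2.1 ++ "_" ++ "x" else st.2.1 ++ "_" ++ ver
      (st.1 ++ "_" ++ ver, fun_name_x, st.2.2 + 1))
    (prefix_, prefix_, 0)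
  (st.1, st.2.1)

-- ===== PORT B =====
-- inner recursive go: builds the two suffixes back-to-front; strip is done as we descend
def goB : List (List Char) → Int → String × String
  | [], _ => ("", "")
  | p :: parts, k =>
    let head := PySem.Str.strip (String.ofList p)
    let r := goB parts (k + 1)
    ("_" ++ head ++ r.1, "_" ++ (if k ≥ 3 then "x" else head) ++ r.2)

def get_funname_from_protocol_version_alt (protocol_version : String) (prefix_ : String) : String × String :=
  let s := goB (PySem.Chars.splitOn protocol_version.toList ['.']) 0
  (prefix_ ++ s.1, prefix_ ++ s.2)

-- ===== PRECONDITION & SPEC =====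
def Spec_get_funname_from_protocol_version (protocol_version : String) (prefix_ : String) (out : String × String) : Prop := out = get_funname_from_protocol_version_alt protocol_version prefix_
instance (protocol_version : String) (prefix_ : String) (out : String × String) : Decidable (Spec_get_funname_from_protocol_version protocol_version prefix_ out) := by unfold Spec_get_funname_from_protocol_version; infer_instance

-- ===== CLAIM (what is proved, stated in full; the proofs are below) =====
def Claim_equal_get_funname_from_protocol_version : Prop := ∀ (protocol_version : String) (prefix_ : String), Dom_get_funname_from_protocol_version protocol_version prefix_ → Spec_get_funname_from_protocol_version protocol_version prefix_ (get_funname_from_protocol_version protocol_version prefix_)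

-- ===== LEMMAS AND PROOFS =====

theorem foldl_eq_goB (ps : List (List Char)) (fn fnx : String) (i : Int) :
    (ps.map (fun p => PySem.Str.strip (String.ofList p))).foldl
      (fun (st : String × String × Int) ver =>
        (st.1 ++ "_" ++ ver,
         if st.2.2 ≥ 3 then st.2.1 ++ "_" ++ "x" else st.2.1 ++ "_" ++ ver,
         st.2.2 + 1))
      (fn, fnx, i)
    = (fn ++ (goB ps i).1, fnx ++ (goB ps i).2, i + ps.length) := by
  induction ps generalizing fn fnx i with
  | nil => simp [goB]
  | cons p t ih =>
    simp only [List.map_cons, List.foldl_cons, ih, goB, Prod.mk.injEq]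
    refine ⟨by simp [String.append_assoc], ?_, by push_cast [List.length_cons]; omega⟩
    split_ifs <;> simp [String.append_assoc]

-- ===== VERDICT (by name: the statement is the Claim_ definition above) =====
theorem get_funname_from_protocol_version_spec : Claim_equal_get_funname_from_protocol_version := by
  intro pv pre _
  unfold Spec_get_funname_from_protocol_version
  unfold get_funname_from_protocol_version get_funname_from_protocol_version_alt params_split
  dsimp only
  rw [show (".".toList) = ['.'] from rfl, foldl_eq_goB]
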